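-- pv_equiv track=rewrite | github.com/mbtiongson1/gaia-skill-tree | scripts/validate.py | validate_unique_ids
-- ===== SOURCE A (Python) =====
-- def validate_unique_ids(graph):
--     """Check that skill IDs and edges are unique within the graph."""
--     errors = []
--
--     seen_skill_ids = set()
--     duplicate_skill_ids = set()
--     for skill in graph.get("skills", []):
--         skill_id = skill.get("id")
--         if skill_id in seen_skill_ids:
--             duplicate_skill_ids.add(skill_id)
--         seen_skill_ids.add(skill_id)
--
--     for skill_id in sorted(duplicate_skill_ids):
--         errors.append(f"Duplicate skill id '{skill_id}' found in skills.")
--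
--     seen_edges = set()
--     duplicate_edges = set()
--     for edge in graph.get("edges", []):
--         edge_key = (
--             edge.get("sourceSkillId"),
--             edge.get("targetSkillId"),
--             edge.get("edgeType", "prerequisite"),
--         )
--         if edge_key in seen_edges:
--             duplicate_edges.add(edge_key)
--         seen_edges.add(edge_key)
--
--     for source, target, edge_type in sorted(duplicate_edges):
--         errors.append(
--             f"Duplicate edge '{source}->{target}' with edgeType '{edge_type}' found in edges."
--         )
--
--     return errors
-- ===== SOURCE B (Python) =====
-- def validate_unique_ids(graph):
--     """Check that skill IDs and edges are unique within the graph."""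
--
--     def opt(v):
--         # total sort key: None sorts after all strings, strings by value
--         return (v is None, "" if v is None else v)
--
--     def dup_runs(ordered):
--         # scan a key-sorted list, emit one representative per run of length >= 2
--         dups = []
--         i, n = 0, len(ordered)
--         while i < n:
--             j = i
--             while j < n and ordered[j] == ordered[i]:
--                 j += 1
--             if j - i >= 2:
--                 dups.append(ordered[i])
--             i = j
--         return dups
--
--     skill_keys = [skill.get("id") for skill in graph.get("skills", [])]
--     edge_keys = [
--         (
--             edge.get("sourceSkillId"),
--             edge.get("targetSkillId"),
--             edge.get("edgeType", "prerequisite"),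
--         )
--         for edge in graph.get("edges", [])
--     ]
--
--     errors = [
--         f"Duplicate skill id '{skill_id}' found in skills."
--         for skill_id in dup_runs(sorted(skill_keys, key=opt))
--     ]
--     errors += [
--         f"Duplicate edge '{source}->{target}' with edgeType '{edge_type}' found in edges."
--         for source, target, edge_type in dup_runs(
--             sorted(edge_keys, key=lambda k: (opt(k[0]), opt(k[1]), k[2]))
--         )
--     ]
--     return errors
-- ===== Notes on version B (the rewrite author's own statement) =====
-- stated objective: alternative
-- what changed: Replaces A's hash-set membership bookkeeping (seen/duplicate sets, then sorting the duplicate set) by a sort-then-adjacent-run-scan: all skill-id / edge keys are sorted once under a total key (None sorts after strings), and duplicates are read off as runs of length >= 2 in one linear scan, already in output order, so no set or dict is ever built.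
import Mathlib
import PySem

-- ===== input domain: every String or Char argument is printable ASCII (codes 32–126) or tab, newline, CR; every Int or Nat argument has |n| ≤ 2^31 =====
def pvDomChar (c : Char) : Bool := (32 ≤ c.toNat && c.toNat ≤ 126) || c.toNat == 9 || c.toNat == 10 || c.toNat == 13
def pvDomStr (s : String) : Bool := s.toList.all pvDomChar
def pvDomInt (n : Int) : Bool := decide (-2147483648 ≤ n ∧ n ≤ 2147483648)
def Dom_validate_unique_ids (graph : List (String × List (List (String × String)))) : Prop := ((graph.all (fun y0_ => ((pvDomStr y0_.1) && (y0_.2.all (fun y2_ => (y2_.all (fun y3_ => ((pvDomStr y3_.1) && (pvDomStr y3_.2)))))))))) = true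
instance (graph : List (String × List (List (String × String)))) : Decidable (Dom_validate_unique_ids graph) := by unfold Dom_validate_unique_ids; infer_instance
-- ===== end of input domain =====

-- B replaces A's seen/duplicate hash-set bookkeeping by sort-then-adjacent-run-scan: all keys are sorted
-- once under a total key (None after strings) and duplicates are read off as runs of length >= 2; return-value
-- equivalence only (neither version mutates its argument).

-- shared field-access helpers (plain transliterations of graph.get(...), skill.get("id"), the edge key tuple)
def pvGraphGet (graph : List (String × List (List (String × String)))) (k : String) : List (List (String × String)) :=
  PySem.Dict.getD ⟨graph⟩ k []
def pvSkillId (skill : List (String × String)) : Option String :=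
  PySem.Dict.get? ⟨skill⟩ "id"
def pvEdgeKey (edge : List (String × String)) : Option String × Option String × String :=
  (PySem.Dict.get? ⟨edge⟩ "sourceSkillId", PySem.Dict.get? ⟨edge⟩ "targetSkillId",
   PySem.Dict.getD ⟨edge⟩ "edgeType" "prerequisite")
-- str() of an optional string (None prints as "None"); also A's skill-id sort key, exact under Pre_
-- (a None id is never sorted next to a string id)
def pvOptStr (o : Option String) : String := o.getD "None"
-- A's sort key for edge keys: Python's lexicographic tuple order; exact under Pre_ (no None decides a comparison)
def pvEdgeSortKey (k : Option String × Option String × String) : Lex (String × Lex (String × String)) :=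
  toLex (k.1.getD "None", toLex (k.2.1.getD "None", k.2.2))
def pvSkillMsg (sid : Option String) : String :=
  "Duplicate skill id '" ++ pvOptStr sid ++ "' found in skills."
def pvEdgeMsg (k : Option String × Option String × String) : String :=
  "Duplicate edge '" ++ pvOptStr k.1 ++ "->" ++ pvOptStr k.2.1 ++ "' with edgeType '" ++ k.2.2 ++ "' found in edges."

-- ===== PORT A =====
def validate_unique_ids (graph : List (String × List (List (String × String)))) : List String :=
  let sd : PySem.Set (Option String) × PySem.Set (Option String) :=
    (pvGraphGet graph "skills").foldl (fun p skill =>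
      (PySem.Set.add p.1 (pvSkillId skill),
       if PySem.Set.contains p.1 (pvSkillId skill) then PySem.Set.add p.2 (pvSkillId skill) else p.2))
      (PySem.Set.empty, PySem.Set.empty)
  let errors : List String :=
    (PySem.List.sorted sd.2 pvOptStr false).foldl (fun es sid => es ++ [pvSkillMsg sid]) []
  let ed : PySem.Set (Option String × Option String × String) × PySem.Set (Option String × Option String × String) :=
    (pvGraphGet graph "edges").foldl (fun p edge =>
      (PySem.Set.add p.1 (pvEdgeKey edge),
       if PySem.Set.contains p.1 (pvEdgeKey edge) then PySem.Set.add p.2 (pvEdgeKey edge) else p.2))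
      (PySem.Set.empty, PySem.Set.empty)
  (PySem.List.sorted ed.2 pvEdgeSortKey false).foldl (fun es k => es ++ [pvEdgeMsg k]) errors

-- ===== PORT B =====
-- B's total sort key 'opt': (v is None, "" if v is None else v); Python's bool/str tuple order is the Lex order
def pvOptKey (o : Option String) : Lex (Bool × String) := toLex (o.isNone, o.getD "")
def pvEdgeTotKey (k : Option String × Option String × String) :
    Lex (Lex (Bool × String) × Lex (Lex (Bool × String) × String)) :=
  toLex (pvOptKey k.1, toLex (pvOptKey k.2.1, k.2.2))
-- B's dup_runs scan over the sorted list: walk the current run (cur, cnt), emit cur when the run closes with cnt >= 2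
def pvRunsAux {α : Type} [DecidableEq α] (cur : α) (cnt : Nat) : List α → List α
  | [] => if 2 ≤ cnt then [cur] else []
  | y :: ys =>
      if y == cur then pvRunsAux cur (cnt + 1) ys
      else (if 2 ≤ cnt then [cur] else []) ++ pvRunsAux y 1 ys
def pvDupRuns {α : Type} [DecidableEq α] : List α → List α
  | [] => []
  | x :: xs => pvRunsAux x 1 xs

def validate_unique_ids_alt (graph : List (String × List (List (String × String)))) : List String :=
  let skill_keys := (pvGraphGet graph "skills").map pvSkillId
  let edge_keys := (pvGraphGet graph "edges").map pvEdgeKey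
  (pvDupRuns (PySem.List.sorted skill_keys pvOptKey false)).map pvSkillMsg
  ++ (pvDupRuns (PySem.List.sorted edge_keys pvEdgeTotKey false)).map pvEdgeMsg

-- ===== PRECONDITION & SPEC =====
def pvIds (graph : List (String × List (List (String × String)))) : List (Option String) :=
  (pvGraphGet graph "skills").map pvSkillId
def pvEKeys (graph : List (String × List (List (String × String)))) : List (Option String × Option String × String) :=
  (pvGraphGet graph "edges").map pvEdgeKey
def pvOkIdPair (a b : Option String) : Bool := a == b || (a.isSome && b.isSome)
def pvOkEdgePair (k1 k2 : Option String × Option String × String) : Bool :=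
  if k1.1 ≠ k2.1 then k1.1.isSome && k2.1.isSome
  else k1.2.1 == k2.2.1 || (k1.2.1.isSome && k2.2.1.isSome)
-- Pre_ excludes graphs whose duplicated skill ids (resp. duplicated edge keys, at the first deciding tuple
-- component) mix a missing key (Python None) with a string: there A's sorted() raises TypeError, while B's
-- total sort key still orders them (B returns the messages with None rendered as 'None', after the strings).
def pvPreBool (graph : List (String × List (List (String × String)))) : Bool :=
  ((pvIds graph).all fun a => decide ((pvIds graph).count a < 2)
    || (pvIds graph).all fun b => decide ((pvIds graph).count b < 2) || pvOkIdPair a b)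
  && ((pvEKeys graph).all fun k1 => decide ((pvEKeys graph).count k1 < 2)
    || (pvEKeys graph).all fun k2 => decide ((pvEKeys graph).count k2 < 2) || pvOkEdgePair k1 k2)
def Pre_validate_unique_ids (graph : List (String × List (List (String × String)))) : Prop :=
  pvPreBool graph = true
instance (graph : List (String × List (List (String × String)))) : Decidable (Pre_validate_unique_ids graph) := by
  unfold Pre_validate_unique_ids; infer_instance
def pvWitness_validate_unique_ids : (List (String × List (List (String × String)))) :=
  [("skills", [[("id", "a")], [("id", "a")], [("id", "b")]]),
   ("edges", [[("sourceSkillId", "a"), ("targetSkillId", "b")], [("sourceSkillId", "a"), ("targetSkillId", "b")]])]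
def Spec_validate_unique_ids (graph : List (String × List (List (String × String)))) (out : List String) : Prop := out = validate_unique_ids_alt graph
instance (graph : List (String × List (List (String × String)))) (out : List String) : Decidable (Spec_validate_unique_ids graph out) := by unfold Spec_validate_unique_ids; infer_instance

-- ===== CLAIM (what is proved, stated in full; the proofs are below) =====
def Claim_equal_validate_unique_ids : Prop := ∀ (graph : List (String × List (List (String × String)))), Dom_validate_unique_ids graph → Pre_validate_unique_ids graph → Spec_validate_unique_ids graph (validate_unique_ids graph)

-- ===== LEMMAS AND PROOFS =====

-- Pre_'s Bool check, read back as the two pairwise conditions on duplicated keys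
theorem pv_pre_ids (graph : List (String × List (List (String × String))))
    (h : Pre_validate_unique_ids graph) :
    ∀ a ∈ pvIds graph, ∀ b ∈ pvIds graph,
      2 ≤ (pvIds graph).count a → 2 ≤ (pvIds graph).count b → pvOkIdPair a b = true := by
  unfold Pre_validate_unique_ids pvPreBool at h
  simp only [Bool.and_eq_true, List.all_eq_true, Bool.or_eq_true, decide_eq_true_eq] at h
  intro a ha b hb hca hcb
  rcases h.1 a ha with hlt | hall
  · omega
  · rcases hall b hb with hlt | hok
    · omega
    · exact hok

theorem pv_pre_edges (graph : List (String × List (List (String × String))))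
    (h : Pre_validate_unique_ids graph) :
    ∀ k1 ∈ pvEKeys graph, ∀ k2 ∈ pvEKeys graph,
      2 ≤ (pvEKeys graph).count k1 → 2 ≤ (pvEKeys graph).count k2 → pvOkEdgePair k1 k2 = true := by
  unfold Pre_validate_unique_ids pvPreBool at h
  simp only [Bool.and_eq_true, List.all_eq_true, Bool.or_eq_true, decide_eq_true_eq] at h
  intro k1 h1 k2 h2 hc1 hc2
  rcases h.2 k1 h1 with hlt | hall
  · omega
  · rcases hall k2 h2 with hlt | hok
    · omega
    · exact hok

-- A's loop state: membership in the duplicate component of the fold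
theorem pv_dup_mem {α : Type} [BEq α] [LawfulBEq α] [DecidableEq α] (xs : List α) (seen dup : List α) (y : α) :
    y ∈ (xs.foldl (fun (p : PySem.Set α × PySem.Set α) x =>
          (PySem.Set.add p.1 x, if PySem.Set.contains p.1 x then PySem.Set.add p.2 x else p.2))
          (seen, dup)).2
      ↔ y ∈ dup ∨ (y ∈ seen ∧ y ∈ xs) ∨ 2 ≤ xs.count y := by
  induction xs generalizing seen dup with
  | nil => simp
  | cons x xs ih =>
      simp only [List.foldl_cons, ih]
      by_cases hx : x ∈ seen
      · by_cases hxy : y = x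
        · subst hxy
          simp [hx, PySem.Set.mem_add]
        · simp [hx, PySem.Set.mem_add, hxy, List.count_cons_of_ne (Ne.symm hxy)]
      · by_cases hxy : y = x
        · subst hxy
          simp only [PySem.Set.contains_iff]
          simp only [if_neg hx, PySem.Set.mem_add, List.count_cons_self, List.mem_cons, true_or,
                     and_true, or_true]
          by_cases hd : y ∈ dup
          · simp [hd]
          · simp [hd, hx, ← List.count_pos_iff]
            omega
        · simp [hx, hxy, List.count_cons_of_ne (Ne.symm hxy)]

-- A's loop state: the duplicate component stays duplicate-free
theorem pv_dup_nodup {α : Type} [BEq α] [LawfulBEq α] (xs : List α) (seen dup : List α) (h : dup.Nodup) :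
    (xs.foldl (fun (p : PySem.Set α × PySem.Set α) x =>
        (PySem.Set.add p.1 x, if PySem.Set.contains p.1 x then PySem.Set.add p.2 x else p.2))
        (seen, dup)).2.Nodup := by
  induction xs generalizing seen dup with
  | nil => exact h
  | cons x xs ih =>
      simp only [List.foldl_cons]
      apply ih
      split
      · exact PySem.Set.nodup_add _ _ h
      · exact h

-- B's run scan, characterised on a key-sorted tail: membership counts the current run, the output is
-- strictly key-increasing, and every output element keys at or above the current element
theorem pv_runs_aux_char {α κ : Type} [BEq α] [LawfulBEq α] [DecidableEq α] [LinearOrder κ] (key : α → κ)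
    (hinj : ∀ a b, key a = key b → a = b) (ys : List α) :
    ∀ (cur : α) (cnt : Nat), ys.Pairwise (fun a b => key a ≤ key b) → (∀ y ∈ ys, key cur ≤ key y) →
      (∀ y, y ∈ pvRunsAux cur cnt ys ↔ (y = cur ∧ 2 ≤ cnt + ys.count cur) ∨ (y ≠ cur ∧ 2 ≤ ys.count y))
      ∧ (pvRunsAux cur cnt ys).Pairwise (fun a b => key a < key b)
      ∧ (∀ y ∈ pvRunsAux cur cnt ys, key cur ≤ key y) := by
  induction ys with
  | nil =>
      intro cur cnt _ _
      refine ⟨fun y => ?_, ?_, ?_⟩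
      · by_cases h2 : 2 ≤ cnt <;> by_cases hy : y = cur <;> simp [pvRunsAux, h2, hy]
      · by_cases h2 : 2 ≤ cnt <;> simp [pvRunsAux, h2]
      · intro y hy'
        by_cases h2 : 2 ≤ cnt
        · simp [pvRunsAux, h2] at hy'; simp [hy']
        · simp [pvRunsAux, h2] at hy'
  | cons z zs ih =>
      intro cur cnt hsort hcur
      have hz : key cur ≤ key z := hcur z (List.mem_cons_self ..)
      have hzs : zs.Pairwise (fun a b => key a ≤ key b) := hsort.of_cons
      have hzzs : ∀ y ∈ zs, key z ≤ key y := fun y hy => (List.pairwise_cons.mp hsort).1 y hy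
      by_cases hzc : z = cur
      · have hstep : pvRunsAux cur cnt (z :: zs) = pvRunsAux cur (cnt + 1) zs := by
          simp [pvRunsAux, hzc]
        have hcurzs : ∀ y ∈ zs, key cur ≤ key y := by rw [← hzc]; exact hzzs
        have IH := ih cur (cnt + 1) hzs hcurzs
        refine ⟨fun y => ?_, by rw [hstep]; exact IH.2.1, by rw [hstep]; exact IH.2.2⟩
        rw [hstep, IH.1 y]
        have hc1 : (z :: zs).count cur = zs.count cur + 1 := by
          rw [hzc, List.count_cons_self]
        constructor
        · rintro (⟨hy, h⟩ | ⟨hy, h⟩)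
          · exact Or.inl ⟨hy, by omega⟩
          · refine Or.inr ⟨hy, ?_⟩
            have hyz : z ≠ y := fun hh => hy (hh.symm.trans hzc)
            have hcy : (z :: zs).count y = zs.count y := List.count_cons_of_ne hyz
            omega
        · rintro (⟨hy, h⟩ | ⟨hy, h⟩)
          · exact Or.inl ⟨hy, by omega⟩
          · refine Or.inr ⟨hy, ?_⟩
            have hyz : z ≠ y := fun hh => hy (hh.symm.trans hzc)
            have hcy : (z :: zs).count y = zs.count y := List.count_cons_of_ne hyz
            omega
      · have hlt : key cur < key z := lt_of_le_of_ne hz (fun h => hzc (hinj _ _ h.symm))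
        have hnotin : ∀ y ∈ z :: zs, y ≠ cur := by
          intro y hy
          rcases List.mem_cons.mp hy with rfl | hy'
          · exact hzc
          · intro h; subst h
            exact absurd (hzzs y hy') (not_le.mpr hlt)
        have hcount0 : (z :: zs).count cur = 0 :=
          List.count_eq_zero.mpr (fun h => hnotin cur h rfl)
        have hcz0 : zs.count cur = 0 := by
          have h' : (z :: zs).count cur = zs.count cur :=
            List.count_cons_of_ne (fun hh => hzc hh)
          omega
        have hstep : pvRunsAux cur cnt (z :: zs)
            = (if 2 ≤ cnt then [cur] else []) ++ pvRunsAux z 1 zs := by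
          simp [pvRunsAux, hzc]
        have IH := ih z 1 hzs hzzs
        have hite : ∀ y : α, (y ∈ (if 2 ≤ cnt then [cur] else [])) ↔ (2 ≤ cnt ∧ y = cur) := by
          intro y; by_cases h2 : 2 ≤ cnt <;> simp [h2]
        refine ⟨fun y => ?_, ?_, ?_⟩
        · rw [hstep, List.mem_append, hite y, IH.1 y]
          constructor
          · rintro (⟨h2, hy⟩ | ⟨hy, h⟩ | ⟨hyz, h⟩)
            · exact Or.inl ⟨hy, by omega⟩
            · refine Or.inr ⟨?_, ?_⟩
              · rw [hy]; exact fun hh => hzc hh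
              · have h1 : (z :: zs).count y = zs.count y + 1 := by
                  rw [hy, List.count_cons_self]
                have h2 : zs.count y = zs.count z := by rw [hy]
                omega
            · refine Or.inr ⟨?_, ?_⟩
              · intro hh
                have : zs.count y = 0 := by rw [hh]; exact hcz0
                omega
              · have h1 : (z :: zs).count y = zs.count y :=
                  List.count_cons_of_ne (fun hh => hyz hh.symm)
                omega
          · rintro (⟨hy, h⟩ | ⟨hy, h⟩)
            · exact Or.inl ⟨by omega, hy⟩
            · by_cases hyz : y = z
              · refine Or.inr (Or.inl ⟨hyz, ?_⟩)
                have h1 : (z :: zs).count y = zs.count y + 1 := by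
                  rw [hyz, List.count_cons_self]
                have h2 : zs.count y = zs.count z := by rw [hyz]
                omega
              · refine Or.inr (Or.inr ⟨hyz, ?_⟩)
                have h1 : (z :: zs).count y = zs.count y :=
                  List.count_cons_of_ne (fun hh => hyz hh.symm)
                omega
        · rw [hstep, List.pairwise_append]
          refine ⟨?_, IH.2.1, ?_⟩
          · by_cases h2 : 2 ≤ cnt <;> simp [h2]
          · intro a ha b hb
            have haz : a = cur := ((hite a).mp ha).2
            rw [haz]
            exact lt_of_lt_of_le hlt (IH.2.2 b hb)
        · intro y hy'
          rw [hstep] at hy'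
          rcases List.mem_append.mp hy' with hy1 | hy2
          · rw [((hite y).mp hy1).2]
          · exact le_of_lt (lt_of_lt_of_le hlt (IH.2.2 y hy2))

-- B's dup_runs on a key-sorted list: exactly the elements occurring at least twice, strictly key-increasing
theorem pv_runs_char {α κ : Type} [BEq α] [LawfulBEq α] [DecidableEq α] [LinearOrder κ] (key : α → κ)
    (hinj : ∀ a b, key a = key b → a = b) (ys : List α)
    (hsort : ys.Pairwise (fun a b => key a ≤ key b)) :
    (∀ y, y ∈ pvDupRuns ys ↔ 2 ≤ ys.count y) ∧ (pvDupRuns ys).Pairwise (fun a b => key a < key b) := by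
  cases ys with
  | nil => simp [pvDupRuns]
  | cons x xs =>
      have hxs : xs.Pairwise (fun a b => key a ≤ key b) := hsort.of_cons
      have hx : ∀ y ∈ xs, key x ≤ key y := fun y hy => (List.pairwise_cons.mp hsort).1 y hy
      have h := pv_runs_aux_char key hinj xs x 1 hxs hx
      refine ⟨fun y => ?_, h.2.1⟩
      show y ∈ pvRunsAux x 1 xs ↔ _
      rw [h.1 y]
      constructor
      · rintro (⟨hy, hcnt⟩ | ⟨hy, hcnt⟩)
        · have h1 : (x :: xs).count y = xs.count y + 1 := by
            rw [hy, List.count_cons_self]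
          have h2 : xs.count y = xs.count x := by rw [hy]
          omega
        · have h1 : (x :: xs).count y = xs.count y :=
            List.count_cons_of_ne (fun hh => hy hh.symm)
          omega
      · intro hcnt
        by_cases hy : y = x
        · refine Or.inl ⟨hy, ?_⟩
          have h1 : (x :: xs).count y = xs.count y + 1 := by
            rw [hy, List.count_cons_self]
          have h2 : xs.count y = xs.count x := by rw [hy]
          omega
        · refine Or.inr ⟨hy, ?_⟩
          have h1 : (x :: xs).count y = xs.count y :=
            List.count_cons_of_ne (fun hh => hy hh.symm)
          omega

-- the central fact: A's "sorted duplicate set" equals B's "runs of the key-sorted key list", provided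
-- B's total order refines A's order on the duplicated elements
theorem pv_main {α κA κB : Type} [DecidableEq α] [BEq α] [LawfulBEq α] [LinearOrder κA] [LinearOrder κB]
    (keyA : α → κA) (keyB : α → κB) (hinjB : ∀ a b, keyB a = keyB b → a = b)
    (xs : List α)
    (hAB : ∀ a b, 2 ≤ xs.count a → 2 ≤ xs.count b → keyB a < keyB b → keyA a < keyA b) :
    PySem.List.sorted
      ((xs.foldl (fun (p : PySem.Set α × PySem.Set α) x =>
          (PySem.Set.add p.1 x, if PySem.Set.contains p.1 x then PySem.Set.add p.2 x else p.2))
          (PySem.Set.empty, PySem.Set.empty)).2) keyA false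
    = pvDupRuns (PySem.List.sorted xs keyB false) := by
  set ys := PySem.List.sorted xs keyB false with hys
  have hperm : ys.Perm xs := PySem.List.sorted_perm xs keyB false
  have hcnt : ∀ y : α, ys.count y = xs.count y := fun y => hperm.count_eq y
  have hchar := pv_runs_char keyB hinjB ys (PySem.List.sorted_pairwise xs keyB)
  have hmemR : ∀ y, y ∈ pvDupRuns ys ↔ 2 ≤ xs.count y := by
    intro y; rw [hchar.1 y, hcnt]
  have hndR : (pvDupRuns ys).Nodup :=
    hchar.2.imp (fun h => ne_of_apply_ne keyB (ne_of_lt h))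
  have hmemD : ∀ y, y ∈ (xs.foldl (fun (p : PySem.Set α × PySem.Set α) x =>
      (PySem.Set.add p.1 x, if PySem.Set.contains p.1 x then PySem.Set.add p.2 x else p.2))
      (PySem.Set.empty, PySem.Set.empty)).2 ↔ 2 ≤ xs.count y := by
    intro y; rw [pv_dup_mem]; simp [PySem.Set.empty]
  have hndD : (xs.foldl (fun (p : PySem.Set α × PySem.Set α) x =>
      (PySem.Set.add p.1 x, if PySem.Set.contains p.1 x then PySem.Set.add p.2 x else p.2))
      (PySem.Set.empty, PySem.Set.empty)).2.Nodup := pv_dup_nodup xs _ _ List.nodup_nil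
  have hpermRD : (pvDupRuns ys).Perm (xs.foldl (fun (p : PySem.Set α × PySem.Set α) x =>
      (PySem.Set.add p.1 x, if PySem.Set.contains p.1 x then PySem.Set.add p.2 x else p.2))
      (PySem.Set.empty, PySem.Set.empty)).2 := by
    refine (List.perm_ext_iff_of_nodup hndR hndD).mpr ?_
    intro y; rw [hmemR, hmemD]
  have hpwA : (pvDupRuns ys).Pairwise (fun a b => keyA a < keyA b) := by
    refine List.Pairwise.imp_of_mem ?_ hchar.2
    intro a b ha hb hlt
    exact hAB a b ((hmemR a).mp ha) ((hmemR b).mp hb) hlt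
  exact PySem.List.sorted_eq_of_perm_of_pairwise_lt _ _ keyA hpermRD hpwA

-- B's total key is injective
theorem pv_optKey_inj : ∀ a b : Option String, pvOptKey a = pvOptKey b → a = b := by
  intro a b h
  cases a <;> cases b <;> simp [pvOptKey] at h <;> simp [h]
theorem pv_optKey_some_lt (s t : String) : pvOptKey (some s) < pvOptKey (some t) ↔ s < t := by
  simp [pvOptKey, Prod.Lex.toLex_lt_toLex]
theorem pv_edgeTotKey_inj : ∀ a b : Option String × Option String × String,
    pvEdgeTotKey a = pvEdgeTotKey b → a = b := by
  intro a b h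
  obtain ⟨a1, a2, a3⟩ := a; obtain ⟨b1, b2, b3⟩ := b
  simp only [pvEdgeTotKey, toLex_inj, Prod.mk.injEq] at h
  obtain ⟨h1, h2, h3⟩ := h
  simp only [Prod.mk.injEq]
  exact ⟨pv_optKey_inj _ _ h1, pv_optKey_inj _ _ h2, h3⟩

-- under Pre_'s id clause, B's total order refines A's string order on duplicated ids
theorem pv_id_key (graph : List (String × List (List (String × String))))
    (hids : ∀ a ∈ pvIds graph, ∀ b ∈ pvIds graph,
      2 ≤ (pvIds graph).count a → 2 ≤ (pvIds graph).count b → pvOkIdPair a b = true) :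
    ∀ a b, 2 ≤ (pvIds graph).count a → 2 ≤ (pvIds graph).count b →
      pvOptKey a < pvOptKey b → pvOptStr a < pvOptStr b := by
  intro a b hca hcb hlt
  have ha : a ∈ pvIds graph := List.count_pos_iff.mp (by omega)
  have hb : b ∈ pvIds graph := List.count_pos_iff.mp (by omega)
  have h := hids a ha b hb hca hcb
  simp only [pvOkIdPair, Bool.or_eq_true, beq_iff_eq, Bool.and_eq_true] at h
  rcases h with rfl | ⟨h1, h2⟩
  · exact absurd hlt (lt_irrefl _)
  · obtain ⟨s, rfl⟩ := Option.isSome_iff_exists.mp h1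
    obtain ⟨t, rfl⟩ := Option.isSome_iff_exists.mp h2
    simpa [pvOptStr] using (pv_optKey_some_lt s t).mp hlt

-- under Pre_'s edge clause, B's total order refines A's tuple order on duplicated edge keys
theorem pv_edge_key (graph : List (String × List (List (String × String))))
    (hek : ∀ k1 ∈ pvEKeys graph, ∀ k2 ∈ pvEKeys graph,
      2 ≤ (pvEKeys graph).count k1 → 2 ≤ (pvEKeys graph).count k2 → pvOkEdgePair k1 k2 = true) :
    ∀ a b, 2 ≤ (pvEKeys graph).count a → 2 ≤ (pvEKeys graph).count b →
      pvEdgeTotKey a < pvEdgeTotKey b → pvEdgeSortKey a < pvEdgeSortKey b := by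
  intro a b hca hcb hlt
  have ha : a ∈ pvEKeys graph := List.count_pos_iff.mp (by omega)
  have hb : b ∈ pvEKeys graph := List.count_pos_iff.mp (by omega)
  have h := hek a ha b hb hca hcb
  obtain ⟨a1, a2, a3⟩ := a; obtain ⟨b1, b2, b3⟩ := b
  simp only [pvOkEdgePair] at h
  simp only [pvEdgeTotKey, Prod.Lex.toLex_lt_toLex] at hlt
  simp only [pvEdgeSortKey, Prod.Lex.toLex_lt_toLex]
  by_cases h1 : a1 = b1
  · subst h1
    rw [if_neg (by simp)] at h
    simp only [Bool.or_eq_true, beq_iff_eq, Bool.and_eq_true] at h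
    have hk : pvOptKey a2 < pvOptKey b2 ∨ pvOptKey a2 = pvOptKey b2 ∧ a3 < b3 := by
      rcases hlt with hk | ⟨-, hk⟩
      · exact absurd hk (lt_irrefl _)
      · exact hk
    refine Or.inr ⟨rfl, ?_⟩
    rcases h with rfl | ⟨hs1, hs2⟩
    · rcases hk with hk | ⟨-, hk3⟩
      · exact absurd hk (lt_irrefl _)
      · exact Or.inr ⟨rfl, hk3⟩
    · obtain ⟨u, rfl⟩ := Option.isSome_iff_exists.mp hs1
      obtain ⟨v, rfl⟩ := Option.isSome_iff_exists.mp hs2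
      rcases hk with hk | ⟨heq, hk3⟩
      · exact Or.inl (by simpa using (pv_optKey_some_lt u v).mp hk)
      · have := pv_optKey_inj _ _ heq
        simp only [Option.some.injEq] at this
        subst this
        exact Or.inr ⟨rfl, hk3⟩
  · rw [if_pos (by simpa using h1)] at h
    simp only [Bool.and_eq_true] at h
    obtain ⟨s, rfl⟩ := Option.isSome_iff_exists.mp h.1
    obtain ⟨t, rfl⟩ := Option.isSome_iff_exists.mp h.2
    rcases hlt with hk | ⟨heq, -⟩
    · exact Or.inl (by simpa using (pv_optKey_some_lt s t).mp hk)
    · exact absurd (pv_optKey_inj _ _ heq) (by simpa using h1)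

-- ===== VERDICT (by name: the statements are the Claim_ definitions above) =====
theorem validate_unique_ids_spec : Claim_equal_validate_unique_ids := by
  intro graph _ hpre
  have hids := pv_pre_ids graph hpre
  have hek := pv_pre_edges graph hpre
  unfold Spec_validate_unique_ids validate_unique_ids validate_unique_ids_alt
  simp only [PySem.List.foldl_append_singleton_eq_map, List.nil_append]
  have hA : (pvGraphGet graph "skills").foldl (fun (p : PySem.Set (Option String) × PySem.Set (Option String)) skill =>
      (PySem.Set.add p.1 (pvSkillId skill),
       if PySem.Set.contains p.1 (pvSkillId skill) then PySem.Set.add p.2 (pvSkillId skill) else p.2))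
      (PySem.Set.empty, PySem.Set.empty)
      = (pvIds graph).foldl (fun (p : PySem.Set (Option String) × PySem.Set (Option String)) x =>
          (PySem.Set.add p.1 x, if PySem.Set.contains p.1 x then PySem.Set.add p.2 x else p.2))
          (PySem.Set.empty, PySem.Set.empty) := by
    rw [pvIds, List.foldl_map]
  have hB : (pvGraphGet graph "edges").foldl (fun (p : PySem.Set (Option String × Option String × String) × PySem.Set (Option String × Option String × String)) edge =>
      (PySem.Set.add p.1 (pvEdgeKey edge),
       if PySem.Set.contains p.1 (pvEdgeKey edge) then PySem.Set.add p.2 (pvEdgeKey edge) else p.2))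
      (PySem.Set.empty, PySem.Set.empty)
      = (pvEKeys graph).foldl (fun (p : PySem.Set (Option String × Option String × String) × PySem.Set (Option String × Option String × String)) x =>
          (PySem.Set.add p.1 x, if PySem.Set.contains p.1 x then PySem.Set.add p.2 x else p.2))
          (PySem.Set.empty, PySem.Set.empty) := by
    rw [pvEKeys, List.foldl_map]
  rw [hA, hB,
      pv_main pvOptStr pvOptKey pv_optKey_inj (pvIds graph) (pv_id_key graph hids),
      pv_main pvEdgeSortKey pvEdgeTotKey pv_edgeTotKey_inj (pvEKeys graph) (pv_edge_key graph hek)]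
  rfl
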